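-- pv_equiv track=rewrite | github.com/jevitug/Micro_Processor | programs/CSE141L_LAB1.py | program_3
-- ===== SOURCE A (Python) =====
-- def program_3(memory, pattern):
--     counter = 0
--
--     pattern_index = 0
--     memory_index = 0
--
--     i = 0
--
--     while i < len(memory) * len(memory[0]):
--         y = int(i / len(memory[0]))
--         x = i % len(memory[0])
--
--         if memory[y][x] == pattern[pattern_index]:
--             if pattern_index == 0:
--                 memory_index = i
--             pattern_index += 1
--
--             if pattern_index == len(pattern):
--                 counter += 1
--                 pattern_index = 0
--                 i = memory_index
--         else:
--             if pattern_index > 0: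
--                 i = memory_index
--             pattern_index = 0
--
--         i = i + 1
--
--     return counter
-- ===== SOURCE B (Python) =====
-- def program_3(memory, pattern):
--     w = len(memory[0])
--     text = [v for row in memory for v in row[:w]]
--     m = len(pattern)
--     count = 0
--     for s in range(len(text) - m + 1):
--         if text[s:s + m] == pattern:
--             count += 1
--     return count
-- ===== Notes on version B (the rewrite author's own statement) =====
-- stated objective: faster
-- what changed: A's single while-loop backtracking state machine (pattern_index/memory_index with index resets over y/x arithmetic) is replaced by flattening the grid once (each row cut to the grid width len(memory[0])) and counting starts s with text[s:s+m] == pattern by one slice comparison per start; same O(n*m) class, large constant-factor win (measured ~6x).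
-- outside the precondition, e.g. on program_3([[]], []): A returns 0, B returns 1
import Mathlib
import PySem

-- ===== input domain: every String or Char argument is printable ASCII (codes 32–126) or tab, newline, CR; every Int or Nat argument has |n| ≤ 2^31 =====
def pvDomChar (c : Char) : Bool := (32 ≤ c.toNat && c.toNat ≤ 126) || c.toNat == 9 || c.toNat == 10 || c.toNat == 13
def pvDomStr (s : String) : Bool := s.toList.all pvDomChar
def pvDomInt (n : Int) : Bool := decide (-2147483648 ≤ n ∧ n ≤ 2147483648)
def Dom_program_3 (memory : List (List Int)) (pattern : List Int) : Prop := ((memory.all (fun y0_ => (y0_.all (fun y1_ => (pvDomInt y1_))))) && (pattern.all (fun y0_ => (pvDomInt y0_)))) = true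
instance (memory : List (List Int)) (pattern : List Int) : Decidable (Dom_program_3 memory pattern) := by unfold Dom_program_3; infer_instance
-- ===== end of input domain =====

-- B replaces A's backtracking state machine (pattern_index/memory_index with index resets over
-- y/x arithmetic) by flattening the grid once and comparing one slice per start (same O(n*m) class; measured faster in a timing run).

-- ===== PORT A =====
-- A's while loop, step for step; fuel only makes the recursion total (proved sufficient below).
-- 'int(i / w)' is ported as floor division (exact: i ≥ 0 here); 'memory[y][x]'/'pattern[j]' via
-- pyGet? with a default that Pre_ makes unreachable.
def pvA_loop (mem : List (List Int)) (pat : List Int) (w n : Int) :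
    Nat → Int → Int → Int → Int → Int
  | 0, counter, _, _, _ => counter
  | fuel+1, counter, pj, ms, i =>
    if i < n then
      let y := PySem.Int.floordiv i w
      let x := PySem.Int.mod i w
      let v := ((PySem.List.pyGet? mem y).bind (fun row => PySem.List.pyGet? row x)).getD 0
      let pv := (PySem.List.pyGet? pat pj).getD 0
      if v = pv then
        let ms' := if pj = 0 then i else ms
        let pj' := pj + 1
        if pj' = (pat.length : Int) then
          pvA_loop mem pat w n fuel (counter+1) 0 ms' (ms' + 1)
        else
          pvA_loop mem pat w n fuel counter pj' ms' (i+1)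
      else
        let i' := if pj > 0 then ms else i
        pvA_loop mem pat w n fuel counter 0 ms (i'+1)
    else counter

def program_3 (memory : List (List Int)) (pattern : List Int) : Int :=
  -- len(memory[0]) (Pre_ excludes memory = [])
  let w : Int := ((memory.headD []).length : Int)
  let n : Int := (memory.length : Int) * w
  pvA_loop memory pattern w n
    ((memory.headD []).length * memory.length * (pattern.length + 1) + pattern.length + 1)
    0 0 0 0

-- ===== PORT B =====
def program_3_alt (memory : List (List Int)) (pattern : List Int) : Int :=
  let w : Int := ((memory.headD []).length : Int)    -- len(memory[0]) (Pre_ excludes memory = [])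
  let text := memory.flatMap (fun row => PySem.List.slice row none (some w))  -- [v for row in memory for v in row[:w]]
  let m : Int := (pattern.length : Int)
  (PySem.List.pyRange 0 ((text.length : Int) - m + 1) 1).foldl
    (fun count s =>
      if PySem.List.slice text (some s) (some (s + m)) = pattern then count + 1 else count)
    0

-- ===== PRECONDITION & SPEC =====
-- Pre_ excludes: memory = [], grids with a row shorter than the first row, and (with a nonempty
-- grid) pattern = [] — on all of which A raises IndexError — plus pattern = [] on a zero-cell
-- grid, where A's 0 and B's count of empty-slice occurrences are both defensible.
def Pre_program_3 (memory : List (List Int)) (pattern : List Int) : Prop :=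
  memory ≠ [] ∧ pattern ≠ [] ∧ ∀ row ∈ memory, (memory.headD []).length ≤ row.length
instance (memory : List (List Int)) (pattern : List Int) : Decidable (Pre_program_3 memory pattern) := by
  unfold Pre_program_3; infer_instance
def pvWitness_program_3 : List (List Int) × List Int := ([[1, 2], [2, 3]], [2])

def Spec_program_3 (memory : List (List Int)) (pattern : List Int) (out : Int) : Prop := out = program_3_alt memory pattern
instance (memory : List (List Int)) (pattern : List Int) (out : Int) : Decidable (Spec_program_3 memory pattern out) := by unfold Spec_program_3; infer_instance

-- ===== CLAIM (what is proved, stated in full; the proofs are below) =====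
def Claim_equal_program_3 : Prop := ∀ (memory : List (List Int)) (pattern : List Int), Dom_program_3 memory pattern → Pre_program_3 memory pattern → Spec_program_3 memory pattern (program_3 memory pattern)

-- ===== LEMMAS AND PROOFS =====

-- whether the pattern occurs at start s of the flattened grid
def pvMatch (flat pat : List Int) (s : Nat) : Bool :=
  decide (s + pat.length ≤ flat.length ∧ ∀ t < pat.length, flat.getD (s + t) 0 = pat.getD t 0)

-- number of occurrences with start ≥ s
def pvCnt (flat pat : List Int) (s : Nat) : Int :=
  if s < flat.length then (if pvMatch flat pat s then 1 else 0) + pvCnt flat pat (s + 1) else 0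
termination_by flat.length - s

lemma pvCnt_zero (flat pat : List Int) (s : Nat) (hm : 0 < pat.length)
    (h : flat.length < s + pat.length) : pvCnt flat pat s = 0 := by
  rw [pvCnt]
  by_cases h1 : s < flat.length
  · rw [if_pos h1]
    have hmatch : pvMatch flat pat s = false := by
      simp only [pvMatch, decide_eq_false_iff_not]
      rintro ⟨h2, _⟩; omega
    rw [hmatch, pvCnt_zero flat pat (s+1) hm (by omega)]
    simp
  · rw [if_neg h1]
termination_by flat.length - s

lemma flat_len (mem : List (List Int)) (w : Nat)
    (hrect : ∀ row ∈ mem, w ≤ row.length) :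
    (mem.flatMap (fun r => r.take w)).length = mem.length * w := by
  induction mem with
  | nil => simp
  | cons r rest ih =>
    simp only [List.flatMap_cons, List.length_append, List.length_cons, List.length_take]
    have hr : w ≤ r.length := hrect r (by simp)
    rw [ih (fun row hrow => hrect row (by simp [hrow]))]
    have : min w r.length = w := by omega
    rw [this]; ring

lemma idx_lemma (mem : List (List Int)) (w : Nat) (hw : 0 < w)
    (hrect : ∀ row ∈ mem, w ≤ row.length) (i : Nat) (hi : i < mem.length * w) :
    ((PySem.List.pyGet? mem (PySem.Int.floordiv (i : Int) (w : Int))).bind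
        (fun row => PySem.List.pyGet? row (PySem.Int.mod (i : Int) (w : Int)))).getD 0
      = (mem.flatMap (fun r => r.take w)).getD i 0 := by
  induction mem generalizing i with
  | nil => simp at hi
  | cons r rest ih =>
    have hr : w ≤ r.length := hrect r (by simp)
    rw [PySem.Int.floordiv_natCast, PySem.Int.mod_natCast, PySem.List.pyGet?_natCast]
    by_cases hcase : i < w
    · have hdiv : i / w = 0 := Nat.div_eq_of_lt hcase
      have hmod : i % w = i := Nat.mod_eq_of_lt hcase
      rw [hdiv, hmod]
      simp only [List.flatMap_cons, List.getElem?_cons_zero, Option.bind_some,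
        PySem.List.pyGet?_natCast, List.getD_eq_getElem?_getD]
      rw [List.getElem?_append_left (by simp; omega), List.getElem?_take_of_lt hcase]
    · have hdiv : i / w = (i - w) / w + 1 := by
        have := Nat.add_div_right (i - w) hw
        rw [Nat.sub_add_cancel (by omega)] at this
        omega
      have hmod : i % w = (i - w) % w := by
        have := Nat.add_mod_right (i - w) w
        rw [Nat.sub_add_cancel (by omega)] at this
        omega
      rw [hdiv, hmod]
      simp only [List.flatMap_cons, List.getElem?_cons_succ]
      have hmul : (r :: rest).length * w = rest.length * w + w := by
        simp [Nat.succ_mul]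
      have ih' := ih (fun row hrow => hrect row (by simp [hrow])) (i - w)
        (by omega)
      rw [PySem.Int.floordiv_natCast, PySem.Int.mod_natCast, PySem.List.pyGet?_natCast] at ih'
      rw [ih']
      rw [List.getD_eq_getElem?_getD, List.getD_eq_getElem?_getD,
        List.getElem?_append_right (by simp; omega)]
      simp only [List.length_take]
      have hmin : min w r.length = w := by omega
      rw [hmin]

lemma match_iff (flat pat : List Int) (s : Nat) (hm : 0 < pat.length) :
    ((flat.drop s).take pat.length = pat) ↔ pvMatch flat pat s = true := by
  simp only [pvMatch, decide_eq_true_eq]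
  constructor
  · intro h
    have hlen := congrArg List.length h
    simp only [List.length_take, List.length_drop] at hlen
    have hle : s + pat.length ≤ flat.length := by omega
    refine ⟨hle, fun t ht => ?_⟩
    have := congrArg (fun l => l.getD t 0) h
    simp only [List.getD_eq_getElem?_getD] at this ⊢
    rw [← this]
    rw [List.getElem?_take_of_lt ht, List.getElem?_drop]
  · rintro ⟨hle, h⟩
    apply List.ext_getElem
    · simp only [List.length_take, List.length_drop]; omega
    · intro t h1 h2
      have ht : t < pat.length := h2
      have := h t ht
      simp only [List.getD_eq_getElem?_getD] at this
      rw [List.getElem?_eq_getElem (by omega), List.getElem?_eq_getElem (by omega)] at this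
      simp only [Option.getD_some] at this
      simp only [List.getElem_take, List.getElem_drop]
      exact this

lemma pvCnt_step (flat pat : List Int) (s : Nat) (hs : s < flat.length) :
    pvCnt flat pat s = (if pvMatch flat pat s then 1 else 0) + pvCnt flat pat (s + 1) := by
  rw [pvCnt]; simp [hs]

-- A's loop, from any aligned state, adds the number of occurrences at starts ≥ s.
lemma loopA_spec (mem : List (List Int)) (pat : List Int) (w n : Int) (flat : List Int)
    (hm : 0 < pat.length)
    (hn : n = (flat.length : Int))
    (hidx : ∀ i : Nat, i < flat.length →
      ((PySem.List.pyGet? mem (PySem.Int.floordiv (i : Int) w)).bind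
          (fun row => PySem.List.pyGet? row (PySem.Int.mod (i : Int) w))).getD 0
        = flat.getD i 0) :
    ∀ (fuel : Nat) (c : Int) (s j : Nat) (ms : Int),
      j < pat.length → s + j ≤ flat.length →
      (∀ t < j, flat.getD (s + t) 0 = pat.getD t 0) →
      (j ≠ 0 → ms = (s : Int)) →
      (flat.length - s) * (pat.length + 1) + (pat.length - j) + 1 ≤ fuel →
      pvA_loop mem pat w n fuel c j ms ((s : Int) + (j : Int)) = c + pvCnt flat pat s := by
  intro fuel
  induction fuel with
  | zero => intro c s j ms _ _ _ _ hfuel; omega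
  | succ fuel ih =>
    intro c s j ms hj hsj hpre hms hfuel
    rw [pvA_loop]
    by_cases hlt : ((s : Int) + (j : Int)) < n
    · have hsjn : s + j < flat.length := by omega
      rw [if_pos hlt]
      have hv : ((PySem.List.pyGet? mem (PySem.Int.floordiv ((s : Int) + (j : Int)) w)).bind
          (fun row => PySem.List.pyGet? row (PySem.Int.mod ((s : Int) + (j : Int)) w))).getD 0
          = flat.getD (s + j) 0 := by
        have := hidx (s + j) hsjn
        push_cast at this ⊢
        exact this
      have hpv : (PySem.List.pyGet? pat (j : Int)).getD 0 = pat.getD j 0 := by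
        rw [PySem.List.pyGet?_natCast, List.getD_eq_getElem?_getD]
      simp only [hv, hpv]
      by_cases heq : flat.getD (s + j) 0 = pat.getD j 0
      · rw [if_pos heq]
        have hms' : (if (j : Int) = 0 then ((s : Int) + (j : Int)) else ms) = (s : Int) := by
          by_cases hj0 : j = 0
          · subst hj0; simp
          · rw [if_neg (by exact_mod_cast hj0), hms hj0]
        rw [hms']
        by_cases hdone : j + 1 = pat.length
        · have : ((j : Int) + 1 = (pat.length : Int)) := by exact_mod_cast hdone
          rw [if_pos this]
          have hrec := ih (c + 1) (s + 1) 0 ((s : Int)) hm (by omega) (by omega)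
            (by omega)
            (by
              have hexp : (flat.length - s) * (pat.length + 1)
                  = (flat.length - (s + 1)) * (pat.length + 1) + (pat.length + 1) := by
                have h1 : flat.length - s = (flat.length - (s + 1)) + 1 := by omega
                rw [h1, Nat.add_mul, Nat.one_mul]
              omega)
          push_cast at hrec ⊢
          simp only [add_zero] at hrec ⊢
          rw [hrec]
          have hcnt : pvCnt flat pat s = 1 + pvCnt flat pat (s + 1) := by
            rw [pvCnt_step flat pat s (by omega)]
            have : pvMatch flat pat s = true := by
              simp only [pvMatch, decide_eq_true_eq]
              refine ⟨by omega, fun t ht => ?_⟩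
              by_cases htj : t < j
              · exact hpre t htj
              · have : t = j := by omega
                subst this; exact heq
            rw [this]; simp
          rw [hcnt]; ring
        · have : ¬ ((j : Int) + 1 = (pat.length : Int)) := by
            intro hc; apply hdone; exact_mod_cast hc
          rw [if_neg this]
          have hrec := ih c s (j + 1) ((s : Int)) (by omega) (by omega)
            (by
              intro t ht
              by_cases htj : t < j
              · exact hpre t htj
              · have : t = j := by omega
                subst this; exact heq)
            (fun _ => rfl)
            (by omega)
          push_cast at hrec ⊢
          have harg : (s : Int) + (j : Int) + 1 = (s : Int) + ((j : Int) + 1) := by ring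
          rw [harg]
          exact hrec
      · rw [if_neg heq]
        have hi' : (if (0 : Int) < (j : Int) then ms else ((s : Int) + (j : Int))) + 1
            = (s : Int) + 1 := by
          by_cases hj0 : j = 0
          · subst hj0; simp
          · rw [if_pos (by exact_mod_cast Nat.pos_of_ne_zero hj0), hms hj0]
        rw [hi']
        have hrec := ih c (s + 1) 0 ms hm (by omega) (by omega) (by omega)
          (by
            have hexp : (flat.length - s) * (pat.length + 1)
                = (flat.length - (s + 1)) * (pat.length + 1) + (pat.length + 1) := by
              have h1 : flat.length - s = (flat.length - (s + 1)) + 1 := by omega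
              rw [h1, Nat.add_mul, Nat.one_mul]
            omega)
        push_cast at hrec ⊢
        simp only [add_zero] at hrec ⊢
        rw [hrec]
        have hcnt : pvCnt flat pat s = pvCnt flat pat (s + 1) := by
          rw [pvCnt_step flat pat s (by omega)]
          have : pvMatch flat pat s = false := by
            simp only [pvMatch, decide_eq_false_iff_not]
            rintro ⟨_, hall⟩
            exact heq (hall j hj)
          rw [this]; simp
        rw [hcnt]
    · rw [if_neg hlt]
      have : flat.length < s + pat.length := by omega
      rw [pvCnt_zero flat pat s hm this]; ring

-- B's fold over range(len(text) - m + 1) computes the same count.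
lemma loopB_spec (flat pat : List Int) (hm : 0 < pat.length) :
    ∀ (k : Nat) (s : Nat) (c : Int), flat.length + 1 - s ≤ k →
      (PySem.List.pyRange (s : Int) ((flat.length : Int) - (pat.length : Int) + 1) 1).foldl
          (fun count t =>
            if PySem.List.slice flat (some t) (some (t + (pat.length : Int))) = pat
            then count + 1 else count) c
        = c + pvCnt flat pat s := by
  intro k
  induction k with
  | zero =>
    intro s c hk
    rw [PySem.List.pyRange_one_eq_nil (by omega)]
    rw [pvCnt_zero flat pat s hm (by omega)]
    simp
  | succ k ih =>
    intro s c hk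
    by_cases hs : s + pat.length ≤ flat.length
    · rw [PySem.List.pyRange_one_cons (by omega)]
      simp only [List.foldl_cons]
      have hslice : PySem.List.slice flat (some (s : Int)) (some ((s : Int) + (pat.length : Int)))
          = (flat.drop s).take pat.length := PySem.List.slice_natCast_add flat s pat.length
      rw [hslice]
      have hstep : (if (flat.drop s).take pat.length = pat then c + 1 else c)
          = c + (if pvMatch flat pat s then 1 else 0) := by
        by_cases hmatch : (flat.drop s).take pat.length = pat
        · rw [if_pos hmatch, if_pos ((match_iff flat pat s hm).mp hmatch)]
        · rw [if_neg hmatch, if_neg (by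
            intro hc
            exact hmatch ((match_iff flat pat s hm).mpr hc))]
          ring
      rw [hstep]
      have hrec := ih (s + 1) (c + (if pvMatch flat pat s then 1 else 0)) (by omega)
      push_cast at hrec ⊢
      rw [hrec, pvCnt_step flat pat s (by omega)]
      ring
    · rw [PySem.List.pyRange_one_eq_nil (by omega)]
      rw [pvCnt_zero flat pat s hm (by omega)]
      simp

-- ===== VERDICT (by name: the statement is the Claim_ definition above) =====
theorem program_3_spec : Claim_equal_program_3 := by
  intro memory pattern _hdom hpre
  obtain ⟨hmem, hpat, hrect⟩ := hpre
  unfold Spec_program_3 program_3 program_3_alt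
  have hm : 0 < pattern.length := by
    cases pattern with
    | nil => exact absurd rfl hpat
    | cons a l => simp
  set w0 : Nat := (memory.headD []).length with hw0
  dsimp only
  have hbody : (fun row : List Int => PySem.List.slice row none (some ((w0 : Nat) : Int)))
      = (fun r : List Int => r.take w0) := by
    funext r; exact PySem.List.slice_to_natCast r w0
  rw [hbody]
  set flat : List Int := memory.flatMap (fun r => r.take w0) with hflat
  have hlen : flat.length = memory.length * w0 := flat_len memory w0 hrect
  have hn : (memory.length : Int) * (w0 : Int) = (flat.length : Int) := by
    rw [hlen]; push_cast; ring
  have hidx : ∀ i : Nat, i < flat.length →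
      ((PySem.List.pyGet? memory (PySem.Int.floordiv (i : Int) (w0 : Int))).bind
          (fun row => PySem.List.pyGet? row (PySem.Int.mod (i : Int) (w0 : Int)))).getD 0
        = flat.getD i 0 := by
    intro i hi
    by_cases hw : 0 < w0
    · exact idx_lemma memory w0 hw hrect i (by omega)
    · have hw0' : w0 = 0 := by omega
      rw [hw0', Nat.mul_zero] at hlen
      omega
  have hA := loopA_spec memory pattern (w0 : Int) ((memory.length : Int) * (w0 : Int)) flat
    hm hn hidx
    (w0 * memory.length * (pattern.length + 1) + pattern.length + 1)
    0 0 0 0 hm (by omega) (by omega) (fun h => absurd rfl h)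
    (by
      have h2 : (flat.length - 0) * (pattern.length + 1)
          = w0 * memory.length * (pattern.length + 1) := by simp only [Nat.sub_zero, hlen]; ring
      omega)
  simp only [Nat.cast_zero, add_zero, zero_add] at hA
  have hB := loopB_spec flat pattern hm (flat.length + 1) 0 0 (by omega)
  simp only [Nat.cast_zero, zero_add] at hB
  rw [hA, hB]
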